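-- pv_equiv track=rewrite | github.com/habunnywy/algorithm_item | leetcode/鬼谷子.py | is_aAddb_onlyOne
-- ===== SOURCE A (Python) =====
-- wait_list=[i for i in range(2,100)]
--
-- def is_aAddb_onlyOne(aAddb):
--     """
--     判断aAddb是否唯一由2~99内两个不相等的数相加而成
--     """
--     pair_num=0
--     for a in range(2,aAddb//2):
--         b=aAddb-a
--         if b in wait_list:
--             pair_num+=1
--         if pair_num>1:
--             return False
--     if pair_num==1:
--         return True
-- ===== SOURCE B (Python) =====
-- def is_aAddb_onlyOne(aAddb):
--     """
--     判断aAddb是否唯一由2~99内两个不相等的数相加而成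
--     """
--     # closed-form count of a in [2, aAddb//2 - 1] with 2 <= aAddb - a <= 99
--     lo = max(2, aAddb - 99)
--     hi = min(aAddb // 2 - 1, aAddb - 2)
--     n = hi - lo + 1 if hi >= lo else 0
--     if n > 1:
--         return False
--     if n == 1:
--         return True
-- ===== Notes on version B (the rewrite author's own statement) =====
-- stated objective: faster
-- what changed: Replaces the loop over range(2, aAddb//2) with a closed-form count of the integer interval of valid addends a (intersection of [2, aAddb//2-1] with [aAddb-99, aAddb-2]).
import Mathlib
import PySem

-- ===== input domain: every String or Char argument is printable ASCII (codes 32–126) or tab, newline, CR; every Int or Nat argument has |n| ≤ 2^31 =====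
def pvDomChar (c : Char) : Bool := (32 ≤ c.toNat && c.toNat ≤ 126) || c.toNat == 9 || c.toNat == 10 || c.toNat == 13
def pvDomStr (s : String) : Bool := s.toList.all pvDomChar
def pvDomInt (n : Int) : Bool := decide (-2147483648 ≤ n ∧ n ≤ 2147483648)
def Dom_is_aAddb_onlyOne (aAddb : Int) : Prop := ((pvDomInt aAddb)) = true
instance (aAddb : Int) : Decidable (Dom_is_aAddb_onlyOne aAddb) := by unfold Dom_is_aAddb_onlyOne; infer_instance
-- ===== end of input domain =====

-- B replaces A's linear loop over range(2, aAddb//2) by a closed-form O(1) interval count (objective: faster).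


-- ===== PORT A =====
-- wait_list = [i for i in range(2, 100)]
def pvWaitList : List Int := PySem.List.pyRange 2 100 1

-- the for-loop with its early 'return False'; falls through to the final 'if pair_num==1'
def pvALoop (aAddb : Int) : List Int → Int → Option Bool
  | [], pairNum => if pairNum = 1 then some true else none
  | a :: rest, pairNum =>
      let b := aAddb - a
      let pairNum := if b ∈ pvWaitList then pairNum + 1 else pairNum
      if pairNum > 1 then some false
      else pvALoop aAddb rest pairNum

def is_aAddb_onlyOne (aAddb : Int) : Option Bool :=
  pvALoop aAddb (PySem.List.pyRange 2 (PySem.Int.floordiv aAddb 2) 1) 0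

-- ===== PORT B =====
def is_aAddb_onlyOne_alt (aAddb : Int) : Option Bool :=
  let lo := max 2 (aAddb - 99)
  let hi := min (PySem.Int.floordiv aAddb 2 - 1) (aAddb - 2)
  let n : Int := if lo ≤ hi then hi - lo + 1 else 0
  if n > 1 then some false
  else if n = 1 then some true
  else none

-- ===== PRECONDITION & SPEC =====
def Spec_is_aAddb_onlyOne (aAddb : Int) (out : Option Bool) : Prop := out = is_aAddb_onlyOne_alt aAddb
instance (aAddb : Int) (out : Option Bool) : Decidable (Spec_is_aAddb_onlyOne aAddb out) := by unfold Spec_is_aAddb_onlyOne; infer_instance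

-- ===== CLAIM (what is proved, stated in full; the proofs are below) =====
def Claim_equal_is_aAddb_onlyOne : Prop := ∀ (aAddb : Int), Dom_is_aAddb_onlyOne aAddb → Spec_is_aAddb_onlyOne aAddb (is_aAddb_onlyOne aAddb)

-- ===== LEMMAS AND PROOFS =====

-- the value both programs return, as a function of the number n of valid decompositions
def pvClassify (n : Int) : Option Bool :=
  if n > 1 then some false
  else if n = 1 then some true
  else none

lemma pvALoop_eq (aAddb : Int) (l : List Int) (p : Int) (hp0 : 0 ≤ p) (hp1 : p ≤ 1) :
    pvALoop aAddb l p =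
      pvClassify (p + (l.countP (fun a => decide ((aAddb - a) ∈ pvWaitList)) : Int)) := by
  induction l generalizing p with
  | nil =>
      simp only [pvALoop, List.countP_nil, Int.natCast_zero, add_zero, pvClassify]
      split_ifs <;> first | rfl | omega
  | cons a rest ih =>
      by_cases h : (aAddb - a) ∈ pvWaitList
      · simp only [pvALoop, List.countP_cons, h, if_pos, decide_true]
        by_cases h2 : p + 1 > 1
        · rw [if_pos h2]
          have hc : (0:Int) ≤ (rest.countP (fun a => decide ((aAddb - a) ∈ pvWaitList)) : Int) :=
            Int.natCast_nonneg _
          simp only [pvClassify]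
          rw [if_pos (by push_cast; omega)]
        · rw [if_neg h2, ih (p+1) (by omega) (by omega)]
          congr 1
          push_cast
          ring
      · simp only [pvALoop, List.countP_cons, h, decide_false, if_false, Bool.false_eq_true,
          add_zero]
        rw [if_neg (by omega), ih p hp0 hp1]

lemma pvCount_range (c d : Int) : ∀ (n : Nat) (s m : Int), (m - s).toNat = n →
    ((PySem.List.pyRange s m 1).countP (fun a => decide (c ≤ a ∧ a ≤ d)) : Int)
      = (max 0 (min (m - 1) d - max s c + 1)) := by
  intro n
  induction n with
  | zero =>
      intro s m hn
      rw [PySem.List.pyRange_one_eq_nil (by omega)]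
      simp only [List.countP_nil, Int.natCast_zero]
      omega
  | succ k ih =>
      intro s m hn
      rw [PySem.List.pyRange_one_cons (by omega), List.countP_cons]
      by_cases h : c ≤ s ∧ s ≤ d
      · have hd : decide (c ≤ s ∧ s ≤ d) = true := by simpa using h
        simp only [hd, if_true]
        push_cast
        rw [ih (s + 1) m (by omega)]
        omega
      · have hd : decide (c ≤ s ∧ s ≤ d) = false := by simpa using h
        simp only [hd, Bool.false_eq_true, if_false, add_zero]
        rw [ih (s + 1) m (by omega)]
        omega

lemma pvMem_wait (aAddb a : Int) :
    decide ((aAddb - a) ∈ pvWaitList) = true ↔ decide (aAddb - 99 ≤ a ∧ a ≤ aAddb - 2) = true := by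
  simp only [decide_eq_true_eq, pvWaitList, PySem.List.mem_pyRange_one]
  omega

-- ===== VERDICT (by name: the statement is the Claim_ definition above) =====
theorem is_aAddb_onlyOne_spec : Claim_equal_is_aAddb_onlyOne := by
  intro aAddb _
  unfold Spec_is_aAddb_onlyOne
  set m := PySem.Int.floordiv aAddb 2 with hm
  have hA : is_aAddb_onlyOne aAddb =
      pvClassify (((PySem.List.pyRange 2 m 1).countP
        (fun a => decide (aAddb - 99 ≤ a ∧ a ≤ aAddb - 2)) : Int)) := by
    rw [is_aAddb_onlyOne, pvALoop_eq aAddb _ 0 le_rfl (by omega)]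
    rw [List.countP_congr (fun x _ => pvMem_wait aAddb x), zero_add]
  rw [hA, pvCount_range (aAddb - 99) (aAddb - 2) _ 2 m rfl]
  show pvClassify _ = is_aAddb_onlyOne_alt aAddb
  simp only [is_aAddb_onlyOne_alt, pvClassify, ← hm]
  have : (max 0 (min (m - 1) (aAddb - 2) - max 2 (aAddb - 99) + 1))
      = (if max 2 (aAddb - 99) ≤ min (m - 1) (aAddb - 2)
         then min (m - 1) (aAddb - 2) - max 2 (aAddb - 99) + 1 else 0) := by
    split_ifs <;> omega
  rw [this]
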